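-- pv_equiv track=rewrite | github.com/maypeppa/maypeppa.github.io | codes/contest/codejam/fractiles.py | f
-- ===== SOURCE A (Python) =====
-- def f(k, c, s):
--     if c * s < k:
--         return 'IMPOSSIBLE'
--     res = []
--     for i in range(0, k, c):
--         x = 0
--         for j in range(i, min(i + c, k)):
--             x = x * k + j
--         res.append(x + 1)
--     return ' '.join([str(x) for x in res])
-- ===== SOURCE B (Python) =====
-- def f(k, c, s):
--     if c * s < k:
--         return 'IMPOSSIBLE'
--     # closed form per block: the value of block [i, i+L) is i*S + T + 1, where
--     # S = sum_{t<L} k^t and T = sum_{t<L} t*k^(L-1-t); S,T computed once per block length.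
--     def ST(L):
--         S = 0
--         T = 0
--         p = 1
--         for t in range(L - 1, -1, -1):
--             S += p
--             T += t * p
--             p *= k
--         return S, T
--     Sf = Tf = 0
--     if c <= k:
--         Sf, Tf = ST(c)
--     out = []
--     i = 0
--     while i + c <= k:
--         out.append(i * Sf + Tf + 1)
--         i += c
--     if i < k:
--         Sp, Tp = ST(k - i)
--         out.append(i * Sp + Tp + 1)
--     return ' '.join(map(str, out))
-- ===== Notes on version B (the rewrite author's own statement) =====
-- stated objective: alternative
-- what changed: Replaces A's inner per-block digit fold x=x*k+j with a closed form: block [i,i+L) has value i*S+T where the coefficients S=sum k^t and T=sum t*k^(L-1-t) are computed once per block length, so full blocks cost one multiply-add each instead of c fold steps.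
-- outside the precondition, e.g. on f(3, -2, -5): A returns '', B does not finish within the time limit; on f(-4, -1, 1): A returns '1 1 1 1', B returns ''; on f(0, 0, 0): A raises ValueError, B does not finish within the time limit
import Mathlib
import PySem

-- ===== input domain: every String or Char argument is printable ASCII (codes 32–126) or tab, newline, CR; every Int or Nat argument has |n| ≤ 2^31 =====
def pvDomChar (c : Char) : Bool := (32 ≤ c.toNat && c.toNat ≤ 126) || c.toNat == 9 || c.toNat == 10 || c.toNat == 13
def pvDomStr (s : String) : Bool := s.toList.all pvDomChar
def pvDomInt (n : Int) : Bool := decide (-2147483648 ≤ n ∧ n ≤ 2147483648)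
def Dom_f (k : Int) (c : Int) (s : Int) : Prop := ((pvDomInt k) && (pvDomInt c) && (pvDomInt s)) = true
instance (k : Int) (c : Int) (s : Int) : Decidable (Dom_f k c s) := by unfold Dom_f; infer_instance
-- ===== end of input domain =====

-- B replaces A's per-block digit fold by a closed form: each block value is i*S + T with the
-- coefficients (S, T) computed once per block length (alternative algorithm, same output).

-- ===== PORT A =====
-- one outer step of A: compute the chunk value for block start i and append it
def astep (k : Int) (c : Int) (res : List Int) (i : Int) : List Int :=
  res ++ [((PySem.List.pyRange i (min (i + c) k) 1).foldl (fun x j => x * k + j) 0) + 1]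

def f (k : Int) (c : Int) (s : Int) : String :=
  if c * s < k then "IMPOSSIBLE"
  else
    let res := (PySem.List.pyRange 0 k c).foldl (astep k c) []
    PySem.Str.join " " (res.map (fun x => PySem.Int.toStr x))

-- ===== PORT B =====
-- B's helper ST(L): S = sum_{t<L} k^t and T = sum_{t<L} t*k^(L-1-t), by the loop over
-- range(L-1, -1, -1) with running power p
def bST (k : Int) (L : Int) : Int × Int :=
  let r := (PySem.List.pyRange (L - 1) (-1) (-1)).foldl
    (fun (st : Int × Int × Int) t => (st.1 + st.2.2, st.2.1 + t * st.2.2, st.2.2 * k)) (0, 0, 1)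
  (r.1, r.2.1)

-- B's while loop: emit full blocks i*Sf+Tf+1 while i+c ≤ k, then the partial block if i < k.
-- Fuel makes the recursion structural; k.toNat+1 is enough fuel whenever 0 < c (Pre_f).
def bloop (k : Int) (c : Int) (Sf : Int) (Tf : Int) : Int → Nat → List Int
  | _, 0 => []
  | i, fuel + 1 =>
    if i + c ≤ k then (i * Sf + Tf + 1) :: bloop k c Sf Tf (i + c) fuel
    else if i < k then [i * (bST k (k - i)).1 + (bST k (k - i)).2 + 1]
    else []

def f_alt (k : Int) (c : Int) (s : Int) : String :=
  if c * s < k then "IMPOSSIBLE"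
  else
    -- Sf = Tf = 0; if c <= k: Sf, Tf = ST(c)   (full blocks exist only when c ≤ k)
    let ST := if c ≤ k then bST k c else (0, 0)
    let out := bloop k c ST.1 ST.2 0 (k.toNat + 1)
    PySem.Str.join " " (out.map (fun x => PySem.Int.toStr x))

-- ===== PRECONDITION & SPEC =====
-- Pre_ excludes nonpositive chunk size c when the guard does not fire: there range(0,k,0) makes A
-- raise ValueError, and for negative c A's backwards range(0,k,c) iteration is an accident of
-- Python range semantics outside the problem's domain (c ≥ 1), where B's while loop diverges.
def Pre_f (k : Int) (c : Int) (s : Int) : Prop := 0 < c ∨ c * s < k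
instance (k : Int) (c : Int) (s : Int) : Decidable (Pre_f k c s) := by unfold Pre_f; infer_instance

def pvWitness_f : Int × Int × Int := (6, 2, 4)

def Spec_f (k : Int) (c : Int) (s : Int) (out : String) : Prop := out = f_alt k c s
instance (k : Int) (c : Int) (s : Int) (out : String) : Decidable (Spec_f k c s out) := by unfold Spec_f; infer_instance

-- ===== CLAIM (what is proved, stated in full; the proofs are below) =====
def Claim_equal_f : Prop := ∀ (k : Int) (c : Int) (s : Int), Dom_f k c s → Pre_f k c s → Spec_f k c s (f k c s)

-- ===== LEMMAS AND PROOFS =====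

-- recurrences the closed-form coefficients satisfy
def sig (k : Int) : Nat → Int
  | 0 => 0
  | n + 1 => 1 + k * sig k n

def tau (k : Int) : Nat → Int
  | 0 => 0
  | n + 1 => (n : Int) + k * tau k n

-- positive-step range: empty when b ≤ a
theorem pyRange_pos_eq_nil (a b st : Int) (hst : 0 < st) (h : b ≤ a) :
    PySem.List.pyRange a b st = [] := by
  rw [PySem.List.pyRange_of_pos a b hst]
  simp [show ¬ a < b by omega]

-- positive-step range: peel the first element
theorem pyRange_pos_cons (a b st : Int) (hst : 0 < st) (h : a < b) :
    PySem.List.pyRange a b st = a :: PySem.List.pyRange (a + st) b st := by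
  rw [PySem.List.pyRange_of_pos a b hst, PySem.List.pyRange_of_pos (a + st) b hst]
  have hcount : ((b - a + st - 1) / st).toNat
      = (if a + st < b then ((b - (a + st) + st - 1) / st).toNat else 0) + 1 := by
    have hd : b - a + st - 1 = (b - a - 1) + 1 * st := by ring
    have hdiv : (b - a + st - 1) / st = (b - a - 1) / st + 1 := by
      rw [hd, Int.add_mul_ediv_right _ _ (by omega : st ≠ 0)]
    by_cases hb : a + st < b
    · have hd2 : b - (a + st) + st - 1 = b - a - 1 := by ring
      rw [if_pos hb, hdiv, hd2]
      have h1 : 0 ≤ (b - a - 1) / st := Int.ediv_nonneg (by omega) (by omega)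
      omega
    · rw [if_neg hb, hdiv]
      have h1 : (b - a - 1) / st = 0 := by
        apply Int.ediv_eq_zero_of_lt (by omega) (by omega)
      omega
  rw [if_pos h, hcount, List.range_succ_eq_map]
  simp only [List.map_cons, List.map_map]
  congr 1
  · simp
  · apply List.map_congr_left
    intro t _
    simp only [Function.comp_apply]
    push_cast
    ring

-- B's ST loop computes (S + p*sig n, T + p*tau n, p*k^n)
theorem bST_fold (k : Int) :
    ∀ (n : Nat) (S T p : Int),
    (PySem.List.pyRange ((n : Int) - 1) (-1) (-1)).foldl
      (fun (st : Int × Int × Int) t => (st.1 + st.2.2, st.2.1 + t * st.2.2, st.2.2 * k)) (S, T, p)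
      = (S + p * sig k n, T + p * tau k n, p * k ^ n) := by
  intro n
  induction n with
  | zero =>
    intro S T p
    rw [PySem.List.pyRange_neg_one_eq_nil (by omega)]
    simp [sig, tau]
  | succ n ih =>
    intro S T p
    have h1 : ((n : Int) + 1) - 1 = (n : Int) := by ring
    rw [show (((n + 1 : Nat) : Int) - 1) = (n : Int) by push_cast; ring,
        PySem.List.pyRange_neg_one_cons (by omega)]
    simp only [List.foldl_cons]
    rw [show (n : Int) - 1 = ((n : Nat) : Int) - 1 from rfl, ih]
    simp only [sig, tau]
    refine Prod.ext ?_ (Prod.ext ?_ ?_) <;> simp <;> ring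

theorem bST_eq (k L : Int) (h : 0 ≤ L) : bST k L = (sig k L.toNat, tau k L.toNat) := by
  unfold bST
  rw [show L - 1 = ((L.toNat : Int)) - 1 by omega, bST_fold]
  simp

-- A's inner digit fold in closed form
theorem chunk_closed (k : Int) :
    ∀ (n : Nat) (i x : Int),
    (PySem.List.pyRange i (i + (n : Int)) 1).foldl (fun x j => x * k + j) x
      = x * k ^ n + i * sig k n + tau k n := by
  intro n
  induction n with
  | zero =>
    intro i x
    rw [show i + ((0 : Nat) : Int) = i by simp, PySem.List.pyRange_one_eq_nil (le_refl _)]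
    simp [sig, tau]
  | succ n ih =>
    intro i x
    have hsplit : i + ((n + 1 : Nat) : Int) = (i + (n : Int)) + 1 := by push_cast; ring
    rw [hsplit, PySem.List.pyRange_one_succ_right (by omega), List.foldl_append]
    simp only [List.foldl_cons, List.foldl_nil, ih]
    simp only [sig, tau]
    ring

-- main invariant: A's chunked fold over range(i,k,c) equals B's while loop from i, for 0 < c
theorem main_inv (k c Sf Tf : Int) (hc : 0 < c)
    (hST : c ≤ k → Sf = sig k c.toNat ∧ Tf = tau k c.toNat) :
    ∀ (n : Nat) (i : Int), 0 ≤ i → (k - i).toNat = n →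
    ∀ (fuel : Nat) (res : List Int), n + 1 ≤ fuel →
    (PySem.List.pyRange i k c).foldl (astep k c) res
      = res ++ bloop k c Sf Tf i fuel := by
  intro n
  induction n using Nat.strong_induction_on with
  | _ n ih =>
    intro i hi hn fuel res hfuel
    obtain ⟨m, rfl⟩ : ∃ m, fuel = m + 1 := ⟨fuel - 1, by omega⟩
    by_cases hik : k ≤ i
    · rw [pyRange_pos_eq_nil i k c hc hik]
      simp only [List.foldl_nil, bloop]
      rw [if_neg (by omega), if_neg (by omega)]
      simp
    · have hik' : i < k := by omega
      rw [pyRange_pos_cons i k c hc hik']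
      simp only [List.foldl_cons]
      by_cases hfull : i + c ≤ k
      · -- full block: min (i+c) k = i+c, length c
        obtain ⟨hS, hT⟩ := hST (by omega)
        have hval : astep k c res i = res ++ [i * Sf + Tf + 1] := by
          unfold astep
          rw [show min (i + c) k = i + (c.toNat : Int) by omega, chunk_closed, hS, hT]
          simp
        rw [hval,
            ih (k - (i + c)).toNat (by omega) (i + c) (by omega) rfl m
              (res ++ [i * Sf + Tf + 1]) (by omega)]
        conv_rhs => rw [bloop]
        rw [if_pos hfull]
        simp
      · -- final partial block, length k - i
        rw [pyRange_pos_eq_nil (i + c) k c hc (by omega), List.foldl_nil]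
        conv_rhs => rw [bloop]
        rw [if_neg hfull, if_pos hik']
        unfold astep
        rw [show min (i + c) k = i + ((k - i).toNat : Int) by omega, chunk_closed,
            bST_eq k (k - i) (by omega)]
        simp

theorem f_eq_f_alt (k c s : Int) (hc : 0 < c) : f k c s = f_alt k c s := by
  unfold f f_alt
  by_cases hg : c * s < k
  · rw [if_pos hg, if_pos hg]
  · rw [if_neg hg, if_neg hg]
    simp only []
    have hST : ∀ hck : c ≤ k, (if c ≤ k then bST k c else ((0 : Int), (0 : Int))).1
          = sig k c.toNat ∧ (if c ≤ k then bST k c else ((0 : Int), (0 : Int))).2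
          = tau k c.toNat := fun hck => by
      rw [if_pos hck, bST_eq k c (by omega)]
      exact ⟨rfl, rfl⟩
    rw [main_inv k c (if c ≤ k then bST k c else (0, 0)).1
        (if c ≤ k then bST k c else (0, 0)).2 hc hST
        (k - 0).toNat 0 (by omega) rfl (k.toNat + 1) [] (by omega)]
    simp

-- ===== VERDICT (by name: the statement is the Claim_ definition above) =====
theorem f_spec : Claim_equal_f := by
  intro k c s _ hpre
  unfold Spec_f
  rcases hpre with hc | hg
  · exact f_eq_f_alt k c s hc
  · unfold f f_alt
    rw [if_pos hg, if_pos hg]
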